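-- pv_equiv track=rewrite | github.com/shy1997-2002/DSA4213_ASSI2 | word_subword_ablation.py | _merge_corpus
-- ===== SOURCE A (Python) =====
-- def _merge_corpus(corpus_syms, pair):
--     a, b = pair
--     merged = []
--     for syms in corpus_syms:
--         i = 0
--         new_syms = []
--         while i < len(syms):
--             if i < len(syms)-1 and syms[i] == a and syms[i+1] == b:
--                 new_syms.append(a + b)
--                 i += 2
--             else:
--                 new_syms.append(syms[i])
--                 i += 1
--         merged.append(new_syms)
--     return merged
-- ===== SOURCE B (Python) =====
-- def _merge_corpus(corpus_syms, pair):
--     a, b = pair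
--     def merge(syms):
--         out = []
--         pending = False  # a previous token equal to `a` is waiting for a `b`
--         for x in syms:
--             if pending and x == b:
--                 out.append(a + b)
--                 pending = False
--                 continue
--             if pending:
--                 out.append(a)
--             pending = (x == a)
--             if not pending:
--                 out.append(x)
--         if pending:
--             out.append(a)
--         return out
--     return [merge(syms) for syms in corpus_syms]
-- ===== Notes on version B (the rewrite author's own statement) =====
-- stated objective: idiomatic
-- what changed: Replaced A's index-cursor while-loop (i += 2 on a merge) with a single structural for-loop over the tokens carrying a one-token 'pending a' state flag, flushed at the end.
import Mathlib
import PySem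

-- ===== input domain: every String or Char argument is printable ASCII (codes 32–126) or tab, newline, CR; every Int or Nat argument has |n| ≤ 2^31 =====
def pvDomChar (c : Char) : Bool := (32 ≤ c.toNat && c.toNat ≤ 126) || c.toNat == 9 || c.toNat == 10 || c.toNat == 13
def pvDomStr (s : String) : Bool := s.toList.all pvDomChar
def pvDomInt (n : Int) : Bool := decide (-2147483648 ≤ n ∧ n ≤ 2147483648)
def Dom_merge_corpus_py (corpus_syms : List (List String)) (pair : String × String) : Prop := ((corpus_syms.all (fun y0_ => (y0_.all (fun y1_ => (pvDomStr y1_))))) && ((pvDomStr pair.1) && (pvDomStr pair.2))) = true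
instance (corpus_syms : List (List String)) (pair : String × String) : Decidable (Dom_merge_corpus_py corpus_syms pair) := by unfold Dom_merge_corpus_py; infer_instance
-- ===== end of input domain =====

-- B replaces A's index cursor (while i < len, i += 2 on a merge) by a single
-- structural pass carrying a one-token "pending `a`" flag (objective: simpler/idiomatic).

-- ===== PORT A =====
-- A's inner while-loop over the index i (appends become cons in recursion order).
def pvA_loop (syms : List String) (a b : String) (i : Nat) : List String :=
  if i < syms.length then
    if i < syms.length - 1 ∧ syms.getD i "" = a ∧ syms.getD (i + 1) "" = b then
      (a ++ b) :: pvA_loop syms a b (i + 2)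
    else
      syms.getD i "" :: pvA_loop syms a b (i + 1)
  else []
termination_by syms.length - i

def merge_corpus_py (corpus_syms : List (List String)) (pair : String × String) : List (List String) :=
  corpus_syms.map (fun syms => pvA_loop syms pair.1 pair.2 0)

-- ===== PORT B =====
-- B's per-sequence state machine: `pending` records an `a` awaiting a following `b`.
def pvB_merge (a b : String) (pending : Bool) : List String → List String
  | [] => if pending then [a] else []
  | x :: xs =>
    if pending = true ∧ x = b then
      (a ++ b) :: pvB_merge a b false xs
    else
      let rest := if x = a then pvB_merge a b true xs else x :: pvB_merge a b false xs
      if pending then a :: rest else rest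

def merge_corpus_py_alt (corpus_syms : List (List String)) (pair : String × String) : List (List String) :=
  corpus_syms.map (fun syms => pvB_merge pair.1 pair.2 false syms)

-- ===== PRECONDITION & SPEC =====
def Spec_merge_corpus_py (corpus_syms : List (List String)) (pair : String × String) (out : List (List String)) : Prop := out = merge_corpus_py_alt corpus_syms pair
instance (corpus_syms : List (List String)) (pair : String × String) (out : List (List String)) : Decidable (Spec_merge_corpus_py corpus_syms pair out) := by unfold Spec_merge_corpus_py; infer_instance

-- ===== CLAIM (what is proved, stated in full; the proofs are below) =====
def Claim_equal_merge_corpus_py : Prop := ∀ (corpus_syms : List (List String)) (pair : String × String), Dom_merge_corpus_py corpus_syms pair → Spec_merge_corpus_py corpus_syms pair (merge_corpus_py corpus_syms pair)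

-- ===== LEMMAS AND PROOFS =====

-- A's loop from index i computes B's machine (pending = false) on the i-th suffix.
theorem pvA_loop_eq_pvB (a b : String) (syms : List String) (i : Nat) :
    pvA_loop syms a b i = pvB_merge a b false (syms.drop i) := by
  by_cases h : i < syms.length
  · have hdrop : syms.drop i = syms[i] :: syms.drop (i + 1) :=
      List.drop_eq_getElem_cons h
    have hgd : syms.getD i "" = syms[i] := List.getD_eq_getElem syms "" h
    rw [hdrop, pvB_merge]
    simp only [Bool.false_eq_true, false_and, if_false]
    by_cases ha : syms[i] = a
    · -- head is `a`: B sets pending on the rest; A looks one token further.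
      rw [if_pos ha]
      by_cases h1 : i + 1 < syms.length
      · have hdrop1 : syms.drop (i + 1) = syms[i + 1] :: syms.drop (i + 2) :=
          List.drop_eq_getElem_cons h1
        have hgd1 : syms.getD (i + 1) "" = syms[i + 1] := List.getD_eq_getElem syms "" h1
        rw [hdrop1, pvB_merge]
        simp only [true_and]
        by_cases hb : syms[i + 1] = b
        · -- the pair matches: both emit a ++ b and continue after it.
          rw [if_pos hb, pvA_loop, if_pos h,
            if_pos ⟨by omega, by rw [hgd]; exact ha, by rw [hgd1]; exact hb⟩]
          rw [pvA_loop_eq_pvB a b syms (i + 2)]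
        · -- no `b` after the `a`: B flushes the pending `a`, A emits syms[i].
          rw [if_neg hb, if_pos trivial, pvA_loop, if_pos h,
            if_neg (by rw [hgd1]; exact fun hc => hb hc.2.2)]
          rw [pvA_loop_eq_pvB a b syms (i + 1), hdrop1, pvB_merge, hgd, ha]
          simp only [Bool.false_eq_true, false_and, if_false]
      · -- `a` is the last token: both produce [a].
        have hnil : syms.drop (i + 1) = [] := List.drop_eq_nil_of_le (by omega)
        rw [hnil, pvB_merge, pvA_loop, if_pos h,
          if_neg (by omega), pvA_loop_eq_pvB a b syms (i + 1), hnil, pvB_merge,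
          hgd, ha]
        simp
    · -- head is not `a`: both emit it unchanged and continue.
      rw [if_neg ha, pvA_loop, if_pos h,
        if_neg (by rw [hgd]; exact fun hc => ha hc.2.1)]
      rw [pvA_loop_eq_pvB a b syms (i + 1), hgd]
  · have hnil : syms.drop i = [] := List.drop_eq_nil_of_le (by omega)
    rw [pvA_loop, if_neg h, hnil, pvB_merge, if_neg (by simp)]
termination_by syms.length - i

-- ===== VERDICT (by name: the statement is the Claim_ definition above) =====
theorem merge_corpus_py_spec : Claim_equal_merge_corpus_py := by
  intro corpus_syms pair _
  unfold Spec_merge_corpus_py merge_corpus_py merge_corpus_py_alt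
  exact List.map_congr_left (fun syms _ => by
    simpa using pvA_loop_eq_pvB pair.1 pair.2 syms 0)
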